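-- pv_equiv track=rewrite | github.com/kgrynk/nonogram_backtracking | main.py | part_incorrect
-- ===== SOURCE A (Python) =====
-- def part_incorrect(line, goal, end):
--     line_bits = sum(line[0:end+1])
--     goal_bits = sum(goal)
--     space_left = len(line) - end
--     if goal_bits - line_bits >= space_left:
--         return True
--
--     i = 0
--     for block in goal:
--         while i <= end:
--             if line[i] == 1:
--                 break
--             i += 1
--         else:
--             return False
--
--         bits = 0
--
--         while i <= end:
--             if line[i] == 0:
--                 break
--             bits += 1
--             i += 1
--         else:
--             return bits > block
--
--         if not bits == block:
--             return True
--
--     while i <= end: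
--         if line[i] == 1 or line[i] == -1:
--             return True
--         i += 1
--
--     return False
-- ===== SOURCE B (Python) =====
-- def part_incorrect(line, goal, end):
--     # Two-phase check: keep A's feasibility guard, then parse the decided
--     # prefix ONCE into a run list (with per-gap "-1 seen" flags) and compare
--     # it against the clue, instead of A's interleaved index scanning.
--     prefix = line[0:end + 1]
--     if sum(goal) - sum(prefix) >= len(line) - end:
--         return True
--     cells = prefix if end >= 0 else []   # no cell is decided when end < 0
--     runs = []    # (length, closed by a 0?)
--     gaps = []    # gaps[j]: a -1 occurs strictly before run j (after run j-1's zero)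
--     g = False    # current gap contains a -1
--     cur = None   # length of the currently open run, or None
--     for c in cells:
--         if cur is None:
--             if c == 1:
--                 cur = 1
--             elif c == -1:
--                 g = True
--         else:
--             if c == 0:
--                 runs.append((cur, True))
--                 gaps.append(g)
--                 g = False
--                 cur = None
--             else:
--                 cur += 1
--     if cur is not None:
--         runs.append((cur, False))
--     gaps.append(g)
--     for idx, block in enumerate(goal):
--         if idx >= len(runs):
--             return False
--         length, closed = runs[idx]
--         if not closed:
--             return length > block
--         if length != block:
--             return True
--     return len(runs) > len(goal) or any(gaps[len(goal):])
-- ===== Notes on version B (the rewrite author's own statement) =====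
-- stated objective: alternative
-- what changed: A interleaves index scanning with the clue loop (nested while loops sharing a cursor); B keeps A's feasibility guard but parses the decided prefix once into a run list plus per-gap '-1 seen' flags and then compares that parse against the clue in a separate loop.
-- outside the precondition, e.g. on part_incorrect([1, 0, 0], [], 3): A returns True, B returns True
import Mathlib
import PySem

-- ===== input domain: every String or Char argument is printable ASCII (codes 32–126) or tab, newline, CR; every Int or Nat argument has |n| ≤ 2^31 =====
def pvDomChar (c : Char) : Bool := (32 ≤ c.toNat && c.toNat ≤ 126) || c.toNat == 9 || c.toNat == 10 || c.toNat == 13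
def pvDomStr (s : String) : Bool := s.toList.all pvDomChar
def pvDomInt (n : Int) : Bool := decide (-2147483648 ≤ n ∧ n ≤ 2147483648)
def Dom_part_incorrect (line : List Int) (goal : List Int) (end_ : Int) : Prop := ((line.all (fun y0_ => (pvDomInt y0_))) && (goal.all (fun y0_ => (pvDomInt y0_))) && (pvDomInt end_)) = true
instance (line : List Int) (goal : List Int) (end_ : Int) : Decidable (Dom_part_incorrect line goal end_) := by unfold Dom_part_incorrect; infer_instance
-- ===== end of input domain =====

-- B re-checks the same partial-line-vs-clue condition by a parse-then-compare decomposition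
-- (one pass building a run list, then a clue-comparison loop) instead of A's interleaved scans;
-- equal on Pre_ (A raises IndexError on most inputs outside it).

-- ===== PORT A =====
-- line[i]  (the .getD 0 default is unreachable: inside Pre_ every accessed index is in range)
def pvCellA (line : List Int) (i : Int) : Int := (PySem.List.pyGet? line i).getD 0

-- 'while i <= end: if line[i] == 1: break; i += 1' : some i on break, none on the while-else
def pvSeekA (line : List Int) (end_ : Int) (i : Int) : Option Int :=
  if h : i ≤ end_ then
    if pvCellA line i = 1 then some i else pvSeekA line end_ (i + 1)
  else none
termination_by (end_ + 1 - i).toNat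
decreasing_by omega

-- 'while i <= end: if line[i] == 0: break; bits += 1; i += 1' : (bits, some i) on break, (bits, none) on while-else
def pvCountA (line : List Int) (end_ : Int) (i : Int) (bits : Int) : Int × Option Int :=
  if h : i ≤ end_ then
    if pvCellA line i = 0 then (bits, some i) else pvCountA line end_ (i + 1) (bits + 1)
  else (bits, none)
termination_by (end_ + 1 - i).toNat
decreasing_by omega

-- the final 'while i <= end' scan for a 1 or a -1
def pvTailA (line : List Int) (end_ : Int) (i : Int) : Bool :=
  if h : i ≤ end_ then
    if pvCellA line i = 1 ∨ pvCellA line i = -1 then true else pvTailA line end_ (i + 1)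
  else false
termination_by (end_ + 1 - i).toNat
decreasing_by omega

-- 'for block in goal' with the shared cursor i
def pvBlocksA (line : List Int) (end_ : Int) : List Int → Int → Bool
  | [], i => pvTailA line end_ i
  | block :: rest, i =>
    match pvSeekA line end_ i with
    | none => false
    | some j =>
      match pvCountA line end_ j 0 with
      | (bits, none) => decide (bits > block)
      | (bits, some k) => if ¬ bits = block then true else pvBlocksA line end_ rest k

def part_incorrect (line : List Int) (goal : List Int) (end_ : Int) : Bool :=
  let line_bits := (PySem.List.slice line (some 0) (some (end_ + 1))).sum
  let goal_bits := goal.sum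
  let space_left := (line.length : Int) - end_
  if goal_bits - line_bits ≥ space_left then true
  else pvBlocksA line end_ goal 0

-- ===== PORT B =====
-- one fold step of B's parse: state (runs, gaps, g, cur)
def pvStepB (st : List (Int × Bool) × List Bool × Bool × Option Int) (c : Int) :
    List (Int × Bool) × List Bool × Bool × Option Int :=
  match st with
  | (runs, gaps, g, none) =>
    if c = 1 then (runs, gaps, g, some 1)
    else if c = -1 then (runs, gaps, true, none)
    else (runs, gaps, g, none)
  | (runs, gaps, g, some cur) =>
    if c = 0 then (runs ++ [(cur, true)], gaps ++ [g], false, none)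
    else (runs, gaps, g, some (cur + 1))

-- the two trailing appends after the fold
def pvFinB (st : List (Int × Bool) × List Bool × Bool × Option Int) :
    List (Int × Bool) × List Bool :=
  ((match st.2.2.2 with
    | some cur => st.1 ++ [(cur, false)]
    | none => st.1),
   st.2.1 ++ [st.2.2.1])

-- 'for idx, block in enumerate(goal)' over the run list, then the final membership check
def pvLoopB : List Int → List (Int × Bool) → List Bool → Bool
  | [], rs, gaps => !rs.isEmpty || gaps.any id
  | _ :: _, [], _ => false
  | b :: gs, (len, closed) :: rs, gaps =>
    if ¬ closed then decide (len > b)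
    else if ¬ len = b then true else pvLoopB gs rs (gaps.drop 1)

def part_incorrect_alt (line : List Int) (goal : List Int) (end_ : Int) : Bool :=
  let pre := PySem.List.slice line (some 0) (some (end_ + 1))
  if goal.sum - pre.sum ≥ (line.length : Int) - end_ then true
  else
    let cells := if end_ ≥ 0 then pre else []   -- no cell is decided when end < 0
    let p := pvFinB (cells.foldl pvStepB ([], [], false, none))
    pvLoopB goal p.1 p.2

-- ===== PRECONDITION & SPEC =====
-- Pre_ excludes end_ ≥ len(line) with an infeasible clue, where A's index scans run past the
-- line and (except for rare early returns, see cites) raise IndexError.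
def Pre_part_incorrect (line : List Int) (goal : List Int) (end_ : Int) : Prop :=
  end_ < line.length ∨
    goal.sum - (PySem.List.slice line (some 0) (some (end_ + 1))).sum ≥ (line.length : Int) - end_
instance (line : List Int) (goal : List Int) (end_ : Int) : Decidable (Pre_part_incorrect line goal end_) := by unfold Pre_part_incorrect; infer_instance

def pvWitness_part_incorrect : List Int × List Int × Int := ([1, 1, 0, -1], [2], 3)

def Spec_part_incorrect (line : List Int) (goal : List Int) (end_ : Int) (out : Bool) : Prop := out = part_incorrect_alt line goal end_
instance (line : List Int) (goal : List Int) (end_ : Int) (out : Bool) : Decidable (Spec_part_incorrect line goal end_ out) := by unfold Spec_part_incorrect; infer_instance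

-- ===== CLAIM (what is proved, stated in full; the proofs are below) =====
def Claim_equal_part_incorrect : Prop := ∀ (line : List Int) (goal : List Int) (end_ : Int), Dom_part_incorrect line goal end_ → Pre_part_incorrect line goal end_ → Spec_part_incorrect line goal end_ (part_incorrect line goal end_)

-- ===== LEMMAS AND PROOFS =====

-- cell predicates of the two programs
def pvNe1 (c : Int) : Bool := !(c == 1)
def pvNe0 (c : Int) : Bool := !(c == 0)
def pvIsM1 (c : Int) : Bool := c == -1
def pvIsFill (c : Int) : Bool := c == 1 || c == -1

-- listified form of A's block loop over the decided cells
def pvAL : List Int → List Int → Bool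
  | d, [] => d.any pvIsFill
  | d, b :: gs =>
    let d1 := d.dropWhile pvNe1
    if d1.isEmpty then false
    else
      let bits : Int := ((d1.takeWhile pvNe0).length : Int)
      let d2 := d1.dropWhile pvNe0
      if d2.isEmpty then decide (bits > b)
      else if ¬ bits = b then true else pvAL d2 gs

-- generic helper facts --------------------------------------------------------

lemma pv_drop_len_takeWhile (p : Int → Bool) (l : List Int) :
    l.drop (l.takeWhile p).length = l.dropWhile p := by
  induction l with
  | nil => simp
  | cons c t ih =>
    by_cases hp : p c
    · simp [hp, ih]
    · simp [hp]

lemma pv_dropWhile_head_false {p : Int → Bool} {l d : List Int} {c : Int}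
    (h : l.dropWhile p = c :: d) : p c = false := by
  have h2 : l.dropWhile p ≠ [] := by simp [h]
  have := List.head_dropWhile_not (p := p) (l := l) h2
  simpa [h] using this

lemma pv_drop_cons {l d : List Int} {i : Nat} {c : Int} (h : l.drop i = c :: d) :
    i < l.length ∧ l[i]? = some c ∧ l.drop (i + 1) = d := by
  refine ⟨?_, ?_, ?_⟩
  · by_contra hlt
    rw [List.drop_eq_nil_of_le (by omega)] at h
    simp at h
  · have : (l.drop i)[0]? = some c := by simp [h]
    simpa using this
  · have : (l.drop i).drop 1 = d := by simp [h]
    simpa [List.drop_drop] using this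

lemma pvParse_dec (d : List Int) (h1 : (d.dropWhile pvNe1).isEmpty = false) :
    ((d.dropWhile pvNe1).dropWhile pvNe0).length < d.length := by
  cases hd : d.dropWhile pvNe1 with
  | nil => simp [hd] at h1
  | cons c t =>
    have hc : pvNe1 c = false := pv_dropWhile_head_false hd
    have hc1 : c = 1 := by simpa [pvNe1] using hc
    have h2 : (c :: t).dropWhile pvNe0 = t.dropWhile pvNe0 := by
      simp [List.dropWhile_cons, hc1, pvNe0]
    have h3 : (t.dropWhile pvNe0).length ≤ t.length := List.length_dropWhile_le _ _
    have h4 : (d.dropWhile pvNe1).length ≤ d.length := List.length_dropWhile_le _ _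
    rw [h2]
    rw [hd] at h4
    simp at h4
    omega

-- recursive characterisation of B's fold parse (g = '-1 already seen in the current gap')
def pvParseG (g : Bool) (d : List Int) : List (Int × Bool) × List Bool :=
  let pre := d.takeWhile pvNe1
  let d1 := d.dropWhile pvNe1
  let flag := g || pre.any pvIsM1
  if h1 : d1.isEmpty then ([], [flag])
  else
    let bits : Int := ((d1.takeWhile pvNe0).length : Int)
    let d2 := d1.dropWhile pvNe0
    if h2 : d2.isEmpty then ([(bits, false)], [flag])
    else
      let p := pvParseG false d2
      ((bits, true) :: p.1, flag :: p.2)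
termination_by d.length
decreasing_by exact pvParse_dec d (Bool.eq_false_iff.mpr h1)


-- A-side loop lemmas ----------------------------------------------------------

lemma pvSeekA_eq (line cells : List Int) (end_ : Int)
    (hcell : ∀ (j : Nat) (c : Int), cells[j]? = some c → pvCellA line (j : Int) = c)
    (hidx : ∀ j : Nat, ((j : Int) ≤ end_) ↔ j < cells.length) :
    ∀ (d : List Int) (i : Nat), cells.drop i = d →
      pvSeekA line end_ (i : Int) =
        if (d.dropWhile pvNe1).isEmpty then none
        else some ((i + (d.takeWhile pvNe1).length : Nat) : Int) := by
  intro d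
  induction d with
  | nil =>
    intro i h
    have hlen : cells.length ≤ i := by
      by_contra hlt
      have := List.drop_eq_nil_iff.mp h
      omega
    rw [pvSeekA, dif_neg (by rw [hidx i]; omega)]
    simp
  | cons c d' ih =>
    intro i h
    obtain ⟨hlt, hget, hdrop⟩ := pv_drop_cons h
    rw [pvSeekA, dif_pos (by rw [hidx i]; exact hlt), hcell i c hget]
    by_cases hc1 : c = 1
    · simp [hc1, pvNe1]
    · have hstep : ((i : Int) + 1) = ((i + 1 : Nat) : Int) := by push_cast; ring
      rw [if_neg hc1, hstep, ih (i + 1) hdrop]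
      have hp : pvNe1 c = true := by simp [pvNe1, hc1]
      simp only [List.dropWhile_cons, List.takeWhile_cons, hp, if_pos, List.length_cons]
      split
      · rfl
      · congr 1
        omega

lemma pvCountA_eq (line cells : List Int) (end_ : Int)
    (hcell : ∀ (j : Nat) (c : Int), cells[j]? = some c → pvCellA line (j : Int) = c)
    (hidx : ∀ j : Nat, ((j : Int) ≤ end_) ↔ j < cells.length) :
    ∀ (d : List Int) (i : Nat) (bits : Int), cells.drop i = d →
      pvCountA line end_ (i : Int) bits =
        (bits + ((d.takeWhile pvNe0).length : Int),
         if (d.dropWhile pvNe0).isEmpty then none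
         else some ((i + (d.takeWhile pvNe0).length : Nat) : Int)) := by
  intro d
  induction d with
  | nil =>
    intro i bits h
    have hlen : cells.length ≤ i := by
      by_contra hlt
      have := List.drop_eq_nil_iff.mp h
      omega
    rw [pvCountA, dif_neg (by rw [hidx i]; omega)]
    simp
  | cons c d' ih =>
    intro i bits h
    obtain ⟨hlt, hget, hdrop⟩ := pv_drop_cons h
    rw [pvCountA, dif_pos (by rw [hidx i]; exact hlt), hcell i c hget]
    by_cases hc0 : c = 0
    · simp [hc0, pvNe0]
    · have hstep : ((i : Int) + 1) = ((i + 1 : Nat) : Int) := by push_cast; ring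
      rw [if_neg hc0, hstep, ih (i + 1) (bits + 1) hdrop]
      have hp : pvNe0 c = true := by simp [pvNe0, hc0]
      simp only [List.dropWhile_cons, List.takeWhile_cons, hp, if_pos, List.length_cons]
      refine Prod.ext ?_ ?_
      · simp; push_cast; ring
      · simp only
        split
        · rfl
        · congr 1
          omega

lemma pvTailA_eq (line cells : List Int) (end_ : Int)
    (hcell : ∀ (j : Nat) (c : Int), cells[j]? = some c → pvCellA line (j : Int) = c)
    (hidx : ∀ j : Nat, ((j : Int) ≤ end_) ↔ j < cells.length) :
    ∀ (d : List Int) (i : Nat), cells.drop i = d →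
      pvTailA line end_ (i : Int) = d.any pvIsFill := by
  intro d
  induction d with
  | nil =>
    intro i h
    have hlen : cells.length ≤ i := by
      by_contra hlt
      have := List.drop_eq_nil_iff.mp h
      omega
    rw [pvTailA, dif_neg (by rw [hidx i]; omega)]
    simp
  | cons c d' ih =>
    intro i h
    obtain ⟨hlt, hget, hdrop⟩ := pv_drop_cons h
    rw [pvTailA, dif_pos (by rw [hidx i]; exact hlt), hcell i c hget]
    by_cases hf : c = 1 ∨ c = -1
    · rw [if_pos hf]
      have : pvIsFill c = true := by rcases hf with hf | hf <;> simp [pvIsFill, hf]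
      simp [this]
    · have hstep : ((i : Int) + 1) = ((i + 1 : Nat) : Int) := by push_cast; ring
      rw [if_neg hf, hstep, ih (i + 1) hdrop]
      have : pvIsFill c = false := by
        push_neg at hf
        simp [pvIsFill, hf.1, hf.2]
      simp [this]

lemma pvBlocksA_eq (line cells : List Int) (end_ : Int)
    (hcell : ∀ (j : Nat) (c : Int), cells[j]? = some c → pvCellA line (j : Int) = c)
    (hidx : ∀ j : Nat, ((j : Int) ≤ end_) ↔ j < cells.length) :
    ∀ (gs : List Int) (d : List Int) (i : Nat), cells.drop i = d →
      pvBlocksA line end_ gs (i : Int) = pvAL d gs := by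
  intro gs
  induction gs with
  | nil =>
    intro d i h
    rw [pvBlocksA, pvAL]
    exact pvTailA_eq line cells end_ hcell hidx d i h
  | cons b gs ih =>
    intro d i h
    rw [pvBlocksA, pvSeekA_eq line cells end_ hcell hidx d i h]
    by_cases h1 : (d.dropWhile pvNe1).isEmpty
    · rw [if_pos h1]
      simp [pvAL, h1]
    · rw [if_neg h1]
      have hdj : cells.drop (i + (d.takeWhile pvNe1).length) = d.dropWhile pvNe1 := by
        have h5 : (cells.drop i).drop (d.takeWhile pvNe1).length
            = cells.drop (i + (d.takeWhile pvNe1).length) := by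
          rw [List.drop_drop]
        rw [← h5, h]
        exact pv_drop_len_takeWhile pvNe1 d
      dsimp only
      rw [pvCountA_eq line cells end_ hcell hidx _ _ 0 hdj]
      by_cases h2 : ((d.dropWhile pvNe1).dropWhile pvNe0).isEmpty
      · rw [if_pos h2]
        simp [pvAL, h1, h2]
      · rw [if_neg h2]
        have hk : cells.drop ((i + (d.takeWhile pvNe1).length)
              + ((d.dropWhile pvNe1).takeWhile pvNe0).length)
            = (d.dropWhile pvNe1).dropWhile pvNe0 := by
          have h5 : (cells.drop (i + (d.takeWhile pvNe1).length)).drop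
              ((d.dropWhile pvNe1).takeWhile pvNe0).length
              = cells.drop ((i + (d.takeWhile pvNe1).length)
                + ((d.dropWhile pvNe1).takeWhile pvNe0).length) := by
            rw [List.drop_drop]
          rw [← h5, hdj]
          exact pv_drop_len_takeWhile pvNe0 (d.dropWhile pvNe1)
        dsimp only
        rw [ih _ _ hk]
        simp only [pvAL, zero_add]
        rw [if_neg h1, if_neg h2]

-- B-side fold lemmas ----------------------------------------------------------

lemma pvFold_gap : ∀ (pre : List Int), (∀ c ∈ pre, pvNe1 c = true) →
    ∀ (runs : List (Int × Bool)) (gaps : List Bool) (g : Bool),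
      pre.foldl pvStepB (runs, gaps, g, none) = (runs, gaps, g || pre.any pvIsM1, none) := by
  intro pre
  induction pre with
  | nil => intro _ runs gaps g; simp
  | cons c t ih =>
    intro hpre runs gaps g
    have hc1 : ¬ c = 1 := by have := hpre c (by simp); simpa [pvNe1] using this
    have ht : ∀ x ∈ t, pvNe1 x = true := fun x hx => hpre x (by simp [hx])
    by_cases hm : c = -1
    · simp [pvStepB, hc1, hm, ih ht, pvIsM1]
    · have hbe : (c == -1) = false := by simp [hm]
      simp [pvStepB, hc1, hm, ih ht, pvIsM1, hbe]

lemma pvFold_run : ∀ (q : List Int), (∀ c ∈ q, pvNe0 c = true) →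
    ∀ (runs : List (Int × Bool)) (gaps : List Bool) (g : Bool) (cur : Int),
      q.foldl pvStepB (runs, gaps, g, some cur) = (runs, gaps, g, some (cur + q.length)) := by
  intro q
  induction q with
  | nil => intro _ runs gaps g cur; simp
  | cons c t ih =>
    intro hq runs gaps g cur
    have hc0 : ¬ c = 0 := by have := hq c (by simp); simpa [pvNe0] using this
    have ht : ∀ x ∈ t, pvNe0 x = true := fun x hx => hq x (by simp [hx])
    simp only [List.foldl_cons, pvStepB, if_neg hc0, ih ht, List.length_cons]
    refine congrArg _ (congrArg _ (congrArg _ (congrArg _ ?_)))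
    push_cast
    ring

lemma pvParseG_skip (g : Bool) (c : Int) (u : List Int) (hc : pvNe1 c = true) :
    pvParseG g (c :: u) = pvParseG (g || pvIsM1 c) u := by
  conv_lhs => rw [pvParseG]
  conv_rhs => rw [pvParseG]
  simp only [List.takeWhile_cons, List.dropWhile_cons, hc, if_pos, List.any_cons,
    Bool.or_assoc]

lemma pvFold_main :
    ∀ (N : Nat) (d : List Int), d.length ≤ N →
      ∀ (runs : List (Int × Bool)) (gaps : List Bool) (g : Bool),
        pvFinB (d.foldl pvStepB (runs, gaps, g, none)) =
          (runs ++ (pvParseG g d).1, gaps ++ (pvParseG g d).2) := by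
  intro N
  induction N with
  | zero =>
    intro d hd runs gaps g
    have hdnil : d = [] := List.eq_nil_of_length_eq_zero (by omega)
    subst hdnil
    rw [pvParseG]
    simp [pvFinB]
  | succ N ihN =>
    intro d hd runs gaps g
    have hsplit : d.takeWhile pvNe1 ++ d.dropWhile pvNe1 = d :=
      List.takeWhile_append_dropWhile
    have hlen1 : (d.takeWhile pvNe1).length + (d.dropWhile pvNe1).length = d.length := by
      have h6 := congrArg List.length hsplit
      rw [List.length_append] at h6
      exact h6
    have hfold : d.foldl pvStepB (runs, gaps, g, none)
        = (d.dropWhile pvNe1).foldl pvStepB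
            (runs, gaps, g || (d.takeWhile pvNe1).any pvIsM1, none) := by
      conv_lhs => rw [← hsplit]
      rw [List.foldl_append, pvFold_gap _ (fun c hc => List.mem_takeWhile_imp hc)]
    rw [hfold, pvParseG]
    cases hd1 : d.dropWhile pvNe1 with
    | nil => simp [pvFinB]
    | cons c t =>
      have hc1 : c = 1 := by
        have := pv_dropWhile_head_false hd1; simpa [pvNe1] using this
      have hstep1 : pvStepB (runs, gaps, g || (d.takeWhile pvNe1).any pvIsM1, none) c
          = (runs, gaps, g || (d.takeWhile pvNe1).any pvIsM1, some 1) := by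
        simp [pvStepB, hc1]
      have hsplit2 : t.takeWhile pvNe0 ++ t.dropWhile pvNe0 = t :=
        List.takeWhile_append_dropWhile
      have hlen2 : (t.takeWhile pvNe0).length + (t.dropWhile pvNe0).length = t.length := by
        have h6 := congrArg List.length hsplit2
        rw [List.length_append] at h6
        exact h6
      have hfold2 : (c :: t).foldl pvStepB
            (runs, gaps, g || (d.takeWhile pvNe1).any pvIsM1, none)
          = (t.dropWhile pvNe0).foldl pvStepB
              (runs, gaps, g || (d.takeWhile pvNe1).any pvIsM1,
               some (1 + (t.takeWhile pvNe0).length)) := by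
        rw [List.foldl_cons, hstep1]
        conv_lhs => rw [← hsplit2]
        rw [List.foldl_append, pvFold_run _ (fun c hc => List.mem_takeWhile_imp hc)]
      rw [hfold2]
      have htake : (c :: t).takeWhile pvNe0 = c :: t.takeWhile pvNe0 := by
        simp [List.takeWhile_cons, hc1, pvNe0]
      have hdrop : (c :: t).dropWhile pvNe0 = t.dropWhile pvNe0 := by
        simp [List.dropWhile_cons, hc1, pvNe0]
      cases hrest : t.dropWhile pvNe0 with
      | nil =>
        simp only [List.foldl_nil, pvFinB]
        rw [dif_neg (by simp), dif_pos (by simp [hdrop, hrest])]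
        simp [htake]
        push_cast
        ring
      | cons e u =>
        have he0 : e = 0 := by
          have := pv_dropWhile_head_false hrest; simpa [pvNe0] using this
        have hstep2 : pvStepB (runs, gaps, g || (d.takeWhile pvNe1).any pvIsM1,
              some (1 + ((t.takeWhile pvNe0).length : Int))) e
            = (runs ++ [(1 + ((t.takeWhile pvNe0).length : Int), true)],
               gaps ++ [g || (d.takeWhile pvNe1).any pvIsM1], false, none) := by
          simp [pvStepB, he0]
        have hu : u.length ≤ N := by
          have : t.length = (t.takeWhile pvNe0).length + (1 + u.length) := by
            rw [← hlen2, hrest]; simp; omega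
          have hdl : (d.dropWhile pvNe1).length = 1 + t.length := by rw [hd1]; simp [Nat.add_comm]
          omega
        rw [List.foldl_cons, hstep2, ihN u hu]
        rw [dif_neg (by simp), dif_neg (by simp [hdrop, hrest])]
        have hskip : pvParseG false (e :: u) = pvParseG false u := by
          rw [pvParseG_skip false e u (by simp [pvNe1, he0]), he0]
          have h0 : pvIsM1 (0 : Int) = false := by decide
          simp [h0]
        simp only [hdrop, hrest, ← hskip, htake]
        refine Prod.ext ?_ ?_
        · simp
          omega
        · simp

-- comparing the listified A with B's parse ------------------------------------

lemma pvAL_nil_eq (d : List Int) :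
    d.any pvIsFill = (!(pvParseG false d).1.isEmpty || (pvParseG false d).2.any id) := by
  by_cases h1 : (d.dropWhile pvNe1).isEmpty
  · have hP : pvParseG false d = ([], [false || (d.takeWhile pvNe1).any pvIsM1]) := by
      rw [pvParseG, dif_pos h1]
    have htk : d.takeWhile pvNe1 = d := by
      have h := List.takeWhile_append_dropWhile (p := pvNe1) (l := d)
      rw [List.isEmpty_iff.mp h1] at h
      simpa using h
    have hall : ∀ c ∈ d, pvNe1 c = true := by
      intro c hc
      rw [← htk] at hc
      exact List.mem_takeWhile_imp hc
    rw [hP]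
    simp only [htk, List.isEmpty_nil, Bool.not_true, Bool.false_or, List.any_cons,
      List.any_nil, Bool.or_false, id_eq]
    refine Bool.eq_iff_iff.mpr ?_
    simp only [List.any_eq_true]
    constructor
    · rintro ⟨c, hc, hfill⟩
      have hne : ¬ c = 1 := by have := hall c hc; simpa [pvNe1] using this
      refine ⟨c, hc, ?_⟩
      simp [pvIsFill, hne] at hfill
      simp [pvIsM1, hfill]
    · rintro ⟨c, hc, hm⟩
      refine ⟨c, hc, ?_⟩
      simp [pvIsM1] at hm
      simp [pvIsFill, hm]
  · have hmem : (1 : Int) ∈ d := by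
      cases hd1 : d.dropWhile pvNe1 with
      | nil => simp [hd1] at h1
      | cons c t =>
        have hc1 : c = 1 := by
          have := pv_dropWhile_head_false hd1; simpa [pvNe1] using this
        exact (List.dropWhile_sublist (p := pvNe1)).subset (hd1 ▸ (hc1 ▸ List.mem_cons_self))
    have hL : d.any pvIsFill = true :=
      List.any_eq_true.mpr ⟨1, hmem, by decide⟩
    rw [hL, pvParseG, dif_neg h1]
    by_cases h2 : ((d.dropWhile pvNe1).dropWhile pvNe0).isEmpty
    · rw [dif_pos h2]; simp
    · rw [dif_neg h2]; simp

lemma pvAL_eq_loop : ∀ (gs d : List Int),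
    pvAL d gs = pvLoopB gs (pvParseG false d).1 (pvParseG false d).2 := by
  intro gs
  induction gs with
  | nil =>
    intro d
    rw [pvAL, pvLoopB]
    exact pvAL_nil_eq d
  | cons b gs ih =>
    intro d
    by_cases h1 : (d.dropWhile pvNe1).isEmpty
    · have hP : pvParseG false d = ([], [false || (d.takeWhile pvNe1).any pvIsM1]) := by
        rw [pvParseG, dif_pos h1]
      rw [hP]
      simp [pvAL, h1, pvLoopB]
    · by_cases h2 : ((d.dropWhile pvNe1).dropWhile pvNe0).isEmpty
      · have hP : pvParseG false d
            = ([((((d.dropWhile pvNe1).takeWhile pvNe0).length : Int), false)],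
               [false || (d.takeWhile pvNe1).any pvIsM1]) := by
          rw [pvParseG, dif_neg h1, dif_pos h2]
        rw [hP]
        simp [pvAL, h1, h2, pvLoopB]
      · have hP : pvParseG false d
            = (((((d.dropWhile pvNe1).takeWhile pvNe0).length : Int), true)
                  :: (pvParseG false ((d.dropWhile pvNe1).dropWhile pvNe0)).1,
               (false || (d.takeWhile pvNe1).any pvIsM1)
                  :: (pvParseG false ((d.dropWhile pvNe1).dropWhile pvNe0)).2) := by
          rw [pvParseG, dif_neg h1, dif_neg h2]
        rw [hP]
        simp only [pvAL, h1, h2]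
        simp only [if_neg (by simp : ¬ (false = true))]
        simp only [pvLoopB, List.drop_succ_cons, List.drop_zero]
        by_cases h3 : ((((d.dropWhile pvNe1).takeWhile pvNe0).length : Int)) = b
        · simp only [h3, not_true, if_neg (by simp : ¬ ¬ (true = true)), ite_self,
            if_neg (by simp : ¬ ¬ True), not_not]
          exact ih _
        · simp [h3]

-- ===== VERDICT (by name: the statement is the Claim_ definition above) =====
theorem part_incorrect_spec : Claim_equal_part_incorrect := by
  intro line goal end_ hdom hpre
  show part_incorrect line goal end_ = part_incorrect_alt line goal end_
  simp only [part_incorrect, part_incorrect_alt]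
  by_cases hg : goal.sum - (PySem.List.slice line (some 0) (some (end_ + 1))).sum
      ≥ (line.length : Int) - end_
  · rw [if_pos hg, if_pos hg]
  · rw [if_neg hg, if_neg hg]
    have hlt : end_ < line.length := by
      rcases hpre with h | h
      · exact h
      · exact absurd h hg
    by_cases hp : end_ ≥ 0
    · rw [if_pos hp]
      have hcells : PySem.List.slice line (some 0) (some (end_ + 1))
          = line.take (end_ + 1).toNat := by
        rw [PySem.List.slice_zero_start, PySem.List.slice_to _ (by omega)]
      set cells := PySem.List.slice line (some 0) (some (end_ + 1)) with hc
      have hlen : cells.length = (end_ + 1).toNat := by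
        rw [hcells, List.length_take]
        omega
      have hcell : ∀ (j : Nat) (c : Int), cells[j]? = some c → pvCellA line (j : Int) = c := by
        intro j c hj
        rw [hcells, List.getElem?_take] at hj
        split at hj
        · rw [pvCellA, PySem.List.pyGet?_natCast line j, hj]
          rfl
        · simp at hj
      have hidx : ∀ j : Nat, ((j : Int) ≤ end_) ↔ j < cells.length := by
        intro j
        rw [hlen]
        omega
      have hA : pvBlocksA line end_ goal ((0 : Nat) : Int) = pvAL cells goal :=
        pvBlocksA_eq line cells end_ hcell hidx goal cells 0 List.drop_zero
      rw [show ((0 : Nat) : Int) = (0 : Int) by simp] at hA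
      rw [hA]
      have hB := pvFold_main cells.length cells le_rfl [] [] false
      rw [hB]
      simpa using pvAL_eq_loop goal cells
    · rw [if_neg hp]
      have hend : ¬ (0 : Int) ≤ end_ := by omega
      have hBside : pvFinB (List.foldl pvStepB ([], [], false, none) []) = ([], [false]) := rfl
      rw [hBside]
      cases goal with
      | nil =>
        rw [pvBlocksA, pvTailA, dif_neg hend]
        rfl
      | cons b gs =>
        rw [pvBlocksA, pvSeekA, dif_neg hend]
        rfl
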